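-- pv_equiv track=rewrite | github.com/woohyunjng/Coding-Practice | PS/Baekjoon/.7000/7490.py | get
-- ===== SOURCE A (Python) =====
-- def get(N, i):
--     if i == N:
--         return [str(N)]
--
--     arr = []
--     new_arr = get(N, i + 1)
--
--     for j in ["+", "-", " "]:
--         for k in new_arr:
--             arr.append(f"{i}{j}{k}")
--
--     return arr
-- ===== SOURCE B (Python) =====
-- def get(N, i):
--     # Iterative forward construction: list the numbers i..N, seed the result
--     # with the first one, then extend every prefix with each operator and the
--     # next number, left to right.
--     nums = [str(k) for k in range(i, N + 1)]
--     res = [nums[0]]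
--     for k in range(1, len(nums)):
--         res = [p + op + nums[k] for p in res for op in "+- "]
--     return res
-- ===== Notes on version B (the rewrite author's own statement) =====
-- stated objective: simpler
-- what changed: Replaces A's right-to-left recursion (suffix lists prefixed by each operator choice) with a single forward loop that grows a list of prefix strings, extending every prefix by each operator and the next number; same lexicographic-by-gap order.
import Mathlib
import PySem

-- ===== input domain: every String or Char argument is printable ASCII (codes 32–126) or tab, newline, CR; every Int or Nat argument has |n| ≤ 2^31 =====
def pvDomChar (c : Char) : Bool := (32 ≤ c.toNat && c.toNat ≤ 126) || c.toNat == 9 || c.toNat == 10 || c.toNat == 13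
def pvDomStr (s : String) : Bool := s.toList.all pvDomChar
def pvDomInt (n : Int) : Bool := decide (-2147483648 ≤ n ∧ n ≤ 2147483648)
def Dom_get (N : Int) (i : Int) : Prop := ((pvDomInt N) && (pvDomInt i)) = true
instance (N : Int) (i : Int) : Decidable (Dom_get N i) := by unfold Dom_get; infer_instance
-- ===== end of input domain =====

-- B replaces A's right-to-left recursion by a single forward loop over prefix strings (simpler, no recursion); same return values on i ≤ N.


-- ===== PORT A =====
-- fuel = (N - i).toNat bounds the recursion depth; the fuel-0 branch is unreachable when i ≤ N
-- (for i > N the Python recursion never terminates — excluded by Pre_get).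
def getAux : Nat → Int → Int → List String
  | fuel, N, i =>
    if i = N then [PySem.Int.toStr N]
    else
      match fuel with
      | 0 => []
      | f + 1 =>
        let newArr := getAux f N (i + 1)
        ["+", "-", " "].foldl (fun arr j =>
          newArr.foldl (fun arr k => arr ++ [PySem.Int.toStr i ++ j ++ k]) arr) []

def get (N : Int) (i : Int) : List String := getAux (N - i).toNat N i

-- ===== PORT B =====
def get_alt (N : Int) (i : Int) : List String :=
  let nums := (PySem.List.pyRange i (N + 1) 1).map PySem.Int.toStr
  match PySem.List.pyGet? nums 0 with
  | none => []  -- nums[0] is an IndexError in Python (only when i > N, outside Pre_)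
  | some first =>
    (PySem.List.pyRange 1 (PySem.List.len nums) 1).foldl
      (fun res k => res.flatMap (fun p => ["+", "-", " "].map (fun op => p ++ op ++ PySem.List.pyGetD nums k "")))
      [first]

-- ===== PRECONDITION & SPEC =====
-- Pre_ excludes exactly i > N, where the Python A recurses without a base case and raises RecursionError (B raises IndexError there).
def Pre_get (N : Int) (i : Int) : Prop := i ≤ N
instance (N : Int) (i : Int) : Decidable (Pre_get N i) := by unfold Pre_get; infer_instance
def pvWitness_get : Int × Int := (3, 1)

def Spec_get (N : Int) (i : Int) (out : List String) : Prop := out = get_alt N i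
instance (N : Int) (i : Int) (out : List String) : Decidable (Spec_get N i out) := by unfold Spec_get; infer_instance

-- ===== CLAIM (what is proved, stated in full; the proofs are below) =====
def Claim_equal_get : Prop := ∀ (N : Int) (i : Int), Dom_get N i → Pre_get N i → Spec_get N i (get N i)

-- ===== LEMMAS AND PROOFS =====

-- A's double append-loop is a flatMap of maps (cited loop-shape lemma).
theorem getAux_succ (f : Nat) (N i : Int) (h : i ≠ N) :
    getAux (f + 1) N i =
      ["+", "-", " "].flatMap (fun j => (getAux f N (i + 1)).map (fun k => PySem.Int.toStr i ++ j ++ k)) := by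
  rw [getAux]
  simp only [if_neg h, List.foldl_cons, List.foldl_nil,
    PySem.List.foldl_append_singleton_eq_map]
  simp [List.append_assoc]

-- B's fold from a list of starting prefixes splits over those prefixes.
theorem foldl_step_flatMap (ks : List Int) (res : List String) :
    ks.foldl (fun res k => res.flatMap (fun p => ["+", "-", " "].map (fun op => p ++ op ++ PySem.Int.toStr k))) res
      = res.flatMap (fun p =>
          ks.foldl (fun res k => res.flatMap (fun q => ["+", "-", " "].map (fun op => q ++ op ++ PySem.Int.toStr k))) [p]) := by
  induction ks generalizing res with
  | nil => simp
  | cons k ks ih =>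
    simp only [List.foldl_cons]
    rw [ih, List.flatMap_assoc]
    congr 1
    funext p
    simp only [List.flatMap_singleton]
    rw [ih]

-- B's fold started from a common prefix mapped onto the starts commutes with that prefix.
theorem foldl_step_map_prefix (ks : List Int) (pre : String) (l : List String) :
    ks.foldl (fun res k => res.flatMap (fun p => ["+", "-", " "].map (fun op => p ++ op ++ PySem.Int.toStr k)))
        (l.map (fun s => pre ++ s))
      = (ks.foldl (fun res k => res.flatMap (fun p => ["+", "-", " "].map (fun op => p ++ op ++ PySem.Int.toStr k))) l).map
          (fun s => pre ++ s) := by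
  induction ks generalizing l with
  | nil => rfl
  | cons k ks ih =>
    simp only [List.foldl_cons]
    rw [← ih]
    congr 1
    simp only [List.flatMap_map, List.map_flatMap]
    congr 1
    funext a
    simp [String.append_assoc]

-- For i ≤ N, B's indexing fold is the direct fold of str(k) over range(i+1, N+1).
theorem get_alt_eq (N i : Int) (h : i ≤ N) :
    get_alt N i
      = (PySem.List.pyRange (i + 1) (N + 1) 1).foldl
          (fun res k => res.flatMap (fun p => ["+", "-", " "].map (fun op => p ++ op ++ PySem.Int.toStr k)))
          [PySem.Int.toStr i] := by
  have hnums : (PySem.List.pyRange i (N + 1) 1).map PySem.Int.toStr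
      = PySem.Int.toStr i :: (PySem.List.pyRange (i + 1) (N + 1) 1).map PySem.Int.toStr := by
    rw [PySem.List.pyRange_one_cons (by omega : i < N + 1), List.map_cons]
  simp only [get_alt]
  rw [hnums]
  simp only [PySem.List.pyGet?_zero, List.getElem?_cons_zero]
  rw [PySem.List.foldl_pyRange_pyGetD
    (PySem.Int.toStr i :: (PySem.List.pyRange (i + 1) (N + 1) 1).map PySem.Int.toStr) ""
    (fun res s => res.flatMap (fun p => ["+", "-", " "].map (fun op => p ++ op ++ s)))
    [PySem.Int.toStr i] (by omega : (0 : Int) ≤ 1)]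
  simp [List.foldl_map]

-- One step of B's fold: consuming the first range element is A's operator-choice layer.
theorem fold_succ (N i : Int) (h : i < N) :
    (PySem.List.pyRange (i + 1) (N + 1) 1).foldl
        (fun res k => res.flatMap (fun p => ["+", "-", " "].map (fun op => p ++ op ++ PySem.Int.toStr k)))
        [PySem.Int.toStr i] =
      ["+", "-", " "].flatMap (fun op =>
        ((PySem.List.pyRange (i + 1 + 1) (N + 1) 1).foldl
          (fun res k => res.flatMap (fun p => ["+", "-", " "].map (fun op => p ++ op ++ PySem.Int.toStr k)))
          [PySem.Int.toStr (i + 1)]).map (fun s => PySem.Int.toStr i ++ op ++ s)) := by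
  rw [PySem.List.pyRange_one_cons (by omega : i + 1 < N + 1)]
  simp only [List.foldl_cons]
  rw [foldl_step_flatMap]
  simp only [List.flatMap_singleton, List.flatMap_map]
  congr 1
  funext op
  have h1 : [PySem.Int.toStr i ++ op ++ PySem.Int.toStr (i + 1)]
      = [PySem.Int.toStr (i + 1)].map (fun s => (PySem.Int.toStr i ++ op) ++ s) := by simp
  rw [h1, foldl_step_map_prefix]

theorem getAux_eq_get_alt (n : Nat) (N i : Int) (hn : N = i + n) :
    getAux n N i = get_alt N i := by
  induction n generalizing i with
  | zero =>
    have hi : i = N := by omega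
    rw [getAux, get_alt_eq N i (by omega)]
    simp [hi, PySem.List.pyRange_one_eq_nil (le_refl (N + 1))]
  | succ f ih =>
    rw [getAux_succ f N i (by omega), ih (i + 1) (by omega),
      get_alt_eq N i (by omega), get_alt_eq N (i + 1) (by omega), fold_succ N i (by omega)]

-- ===== VERDICT (by name: the statement is the Claim_ definition above) =====
theorem get_spec : Claim_equal_get := by
  intro N i _ hpre
  unfold Spec_get _root_.get
  exact getAux_eq_get_alt (N - i).toNat N i (by unfold Pre_get at hpre; omega)
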